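-- pv_equiv track=rewrite | github.com/harshalDharpure/SemEval-2026-Task3-VA-BERT | calculate_all_rmse.py | extract_experiment_info
-- ===== SOURCE A (Python) =====
-- def extract_experiment_info(exp_name):
--     """Extract experiment type, model, data structure, and language from exp name."""
--     parts = exp_name.split('_')
--
--     info = {
--         'exp_type': None,
--         'model': None,
--         'data_structure': None,
--         'language': None
--     }
--
--     # Experiment type
--     if 'exp1' in exp_name or 'direct_finetune' in exp_name:
--         info['exp_type'] = 'Exp1'
--     elif 'exp2' in exp_name or 'pretrained_only' in exp_name:
--         info['exp_type'] = 'Exp2'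
--     elif 'exp3' in exp_name or 'pretrain_finetune' in exp_name:
--         info['exp_type'] = 'Exp3'
--
--     # Model
--     if 'base' in exp_name:
--         info['model'] = 'base'
--     elif 'large' in exp_name:
--         info['model'] = 'large'
--     elif 'xl' in exp_name:
--         info['model'] = 'xl'
--     elif 'mbert' in exp_name:
--         info['model'] = 'mbert'
--     elif 'mdeberta' in exp_name:
--         info['model'] = 'mdeberta'
--
--     # Data structure
--     if 'language_specific' in exp_name:
--         info['data_structure'] = 'language_specific'
--     elif 'multilingual_shuffled' in exp_name or 'shuffled' in exp_name:
--         info['data_structure'] = 'multilingual_shuffled'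
--
--     # Language
--     lang_codes = ['eng', 'jpn', 'rus', 'tat', 'ukr', 'zho']
--     for lang in lang_codes:
--         if lang in exp_name:
--             info['language'] = lang
--             break
--
--     return info
-- ===== SOURCE B (Python) =====
-- # Single-scan re-implementation: one left-to-right pass over the string collects the set of
-- # occurring marker substrings (startswith at each position); fields are then filled from that
-- # hit set by first-match priority. Same output as A's repeated membership tests.
-- _PATTERNS = ('exp1', 'direct_finetune', 'exp2', 'pretrained_only', 'exp3', 'pretrain_finetune',
--              'base', 'large', 'xl', 'mbert', 'mdeberta',
--              'language_specific', 'multilingual_shuffled', 'shuffled',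
--              'eng', 'jpn', 'rus', 'tat', 'ukr', 'zho')
--
-- _FIELDS = (
--     ('exp_type', (('exp1', 'Exp1'), ('direct_finetune', 'Exp1'),
--                   ('exp2', 'Exp2'), ('pretrained_only', 'Exp2'),
--                   ('exp3', 'Exp3'), ('pretrain_finetune', 'Exp3'))),
--     ('model', (('base', 'base'), ('large', 'large'), ('xl', 'xl'),
--                ('mbert', 'mbert'), ('mdeberta', 'mdeberta'))),
--     ('data_structure', (('language_specific', 'language_specific'),
--                         ('multilingual_shuffled', 'multilingual_shuffled'),
--                         ('shuffled', 'multilingual_shuffled'))),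
--     ('language', (('eng', 'eng'), ('jpn', 'jpn'), ('rus', 'rus'),
--                   ('tat', 'tat'), ('ukr', 'ukr'), ('zho', 'zho'))),
-- )
--
--
-- def extract_experiment_info(exp_name):
--     hits = set()
--     for i in range(len(exp_name)):
--         for p in _PATTERNS:
--             if p not in hits and exp_name.startswith(p, i):
--                 hits.add(p)
--     info = {}
--     for field, rules in _FIELDS:
--         info[field] = None
--         for pat, label in rules:
--             if pat in hits:
--                 info[field] = label
--                 break
--     return info
-- ===== Notes on version B (the rewrite author's own statement) =====
-- stated objective: alternative
-- what changed: Instead of A's four independent if/elif chains of substring membership tests, B makes one left-to-right scan over the string collecting the set of marker substrings that occur (startswith at each position), then fills each field by first-match priority against that hit set.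
import Mathlib
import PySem

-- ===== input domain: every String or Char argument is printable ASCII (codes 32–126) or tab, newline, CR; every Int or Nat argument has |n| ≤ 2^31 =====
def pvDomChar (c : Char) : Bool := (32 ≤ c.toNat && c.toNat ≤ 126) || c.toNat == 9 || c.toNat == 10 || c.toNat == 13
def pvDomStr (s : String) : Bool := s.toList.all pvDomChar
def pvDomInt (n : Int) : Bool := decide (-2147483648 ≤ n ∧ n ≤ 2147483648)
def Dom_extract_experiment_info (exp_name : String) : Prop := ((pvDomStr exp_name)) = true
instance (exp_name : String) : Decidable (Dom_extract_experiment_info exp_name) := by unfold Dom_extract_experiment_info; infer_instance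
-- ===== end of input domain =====

set_option maxHeartbeats 1000000


-- B replaces A's four independent if/elif chains of substring tests with one left-to-right
-- scan collecting a hit set of occurring markers, then first-match field assignment from it.

-- ===== PORT A =====
-- the 'for lang in lang_codes: if lang in exp_name: info['language'] = lang; break' loop
def aLangLoop (exp_name : String) (info : PySem.Dict String (Option String)) :
    List String → PySem.Dict String (Option String)
  | [] => info
  | lang :: rest =>
      if PySem.Str.isIn lang exp_name then PySem.Dict.insert info "language" (some lang)
      else aLangLoop exp_name info rest

def extract_experiment_info (exp_name : String) : List (String × Option String) :=
  let _parts := PySem.Str.split? exp_name "_"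
  let info : PySem.Dict String (Option String) := PySem.Dict.ofList
    [("exp_type", none), ("model", none), ("data_structure", none), ("language", none)]
  -- Experiment type
  let info :=
    if PySem.Str.isIn "exp1" exp_name || PySem.Str.isIn "direct_finetune" exp_name then
      PySem.Dict.insert info "exp_type" (some "Exp1")
    else if PySem.Str.isIn "exp2" exp_name || PySem.Str.isIn "pretrained_only" exp_name then
      PySem.Dict.insert info "exp_type" (some "Exp2")
    else if PySem.Str.isIn "exp3" exp_name || PySem.Str.isIn "pretrain_finetune" exp_name then
      PySem.Dict.insert info "exp_type" (some "Exp3")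
    else info
  -- Model
  let info :=
    if PySem.Str.isIn "base" exp_name then PySem.Dict.insert info "model" (some "base")
    else if PySem.Str.isIn "large" exp_name then PySem.Dict.insert info "model" (some "large")
    else if PySem.Str.isIn "xl" exp_name then PySem.Dict.insert info "model" (some "xl")
    else if PySem.Str.isIn "mbert" exp_name then PySem.Dict.insert info "model" (some "mbert")
    else if PySem.Str.isIn "mdeberta" exp_name then PySem.Dict.insert info "model" (some "mdeberta")
    else info
  -- Data structure
  let info :=
    if PySem.Str.isIn "language_specific" exp_name then
      PySem.Dict.insert info "data_structure" (some "language_specific")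
    else if PySem.Str.isIn "multilingual_shuffled" exp_name || PySem.Str.isIn "shuffled" exp_name then
      PySem.Dict.insert info "data_structure" (some "multilingual_shuffled")
    else info
  -- Language
  (aLangLoop exp_name info ["eng", "jpn", "rus", "tat", "ukr", "zho"]).items

-- ===== PORT B =====
def pvPatterns : List String :=
  ["exp1", "direct_finetune", "exp2", "pretrained_only", "exp3", "pretrain_finetune",
   "base", "large", "xl", "mbert", "mdeberta",
   "language_specific", "multilingual_shuffled", "shuffled",
   "eng", "jpn", "rus", "tat", "ukr", "zho"]

def pvFields : List (String × List (String × String)) :=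
  [("exp_type", [("exp1", "Exp1"), ("direct_finetune", "Exp1"),
                 ("exp2", "Exp2"), ("pretrained_only", "Exp2"),
                 ("exp3", "Exp3"), ("pretrain_finetune", "Exp3")]),
   ("model", [("base", "base"), ("large", "large"), ("xl", "xl"),
              ("mbert", "mbert"), ("mdeberta", "mdeberta")]),
   ("data_structure", [("language_specific", "language_specific"),
                       ("multilingual_shuffled", "multilingual_shuffled"),
                       ("shuffled", "multilingual_shuffled")]),
   ("language", [("eng", "eng"), ("jpn", "jpn"), ("rus", "rus"),
                 ("tat", "tat"), ("ukr", "ukr"), ("zho", "zho")])]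

-- inner loop 'for p in _PATTERNS: if p not in hits and exp_name.startswith(p, i): hits.add(p)'
-- (exp_name.startswith(p, i) with 0 ≤ i is exactly: p is a prefix of exp_name[i:])
def pvScanPats (chars : List Char) (i : Nat) (hits : PySem.Set String) :
    List String → PySem.Set String
  | [] => hits
  | p :: rest =>
      let hits := if !(PySem.Set.contains hits p) &&
                     PySem.Chars.startswith (chars.drop i) p.toList
                  then PySem.Set.add hits p else hits
      pvScanPats chars i hits rest

-- inner 'for pat, label in rules: if pat in hits: info[field] = label; break'
def pvRuleLoop (hits : PySem.Set String) (info : PySem.Dict String (Option String))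
    (field : String) : List (String × String) → PySem.Dict String (Option String)
  | [] => info
  | (pat, label) :: rest =>
      if PySem.Set.contains hits pat then PySem.Dict.insert info field (some label)
      else pvRuleLoop hits info field rest

-- 'for field, rules in _FIELDS: info[field] = None; for pat, label in rules: …'
def pvFieldLoop (hits : PySem.Set String) (info : PySem.Dict String (Option String)) :
    List (String × List (String × String)) → PySem.Dict String (Option String)
  | [] => info
  | (field, rules) :: rest =>
      let info := PySem.Dict.insert info field none
      let info := pvRuleLoop hits info field rules
      pvFieldLoop hits info rest

def extract_experiment_info_alt (exp_name : String) : List (String × Option String) :=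
  let chars := exp_name.toList
  let hits := (List.range chars.length).foldl
    (fun h i => pvScanPats chars i h pvPatterns) PySem.Set.empty
  (pvFieldLoop hits PySem.Dict.empty pvFields).items

-- ===== PRECONDITION & SPEC =====
def Spec_extract_experiment_info (exp_name : String) (out : List (String × Option String)) : Prop := out = extract_experiment_info_alt exp_name
instance (exp_name : String) (out : List (String × Option String)) : Decidable (Spec_extract_experiment_info exp_name out) := by unfold Spec_extract_experiment_info; infer_instance

-- ===== CLAIM =====
def Claim_equal_extract_experiment_info : Prop := ∀ (exp_name : String), Dom_extract_experiment_info exp_name → Spec_extract_experiment_info exp_name (extract_experiment_info exp_name)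

-- ===== LEMMAS AND PROOFS =====

-- the per-field first-match values, the meeting point of the two ports
def fieldE (n : String) : Option String :=
  if PySem.Str.isIn "exp1" n || PySem.Str.isIn "direct_finetune" n then some "Exp1"
  else if PySem.Str.isIn "exp2" n || PySem.Str.isIn "pretrained_only" n then some "Exp2"
  else if PySem.Str.isIn "exp3" n || PySem.Str.isIn "pretrain_finetune" n then some "Exp3"
  else none

def fieldM (n : String) : Option String :=
  if PySem.Str.isIn "base" n then some "base"
  else if PySem.Str.isIn "large" n then some "large"
  else if PySem.Str.isIn "xl" n then some "xl"
  else if PySem.Str.isIn "mbert" n then some "mbert"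
  else if PySem.Str.isIn "mdeberta" n then some "mdeberta"
  else none

def fieldD (n : String) : Option String :=
  if PySem.Str.isIn "language_specific" n then some "language_specific"
  else if PySem.Str.isIn "multilingual_shuffled" n || PySem.Str.isIn "shuffled" n then some "multilingual_shuffled"
  else none

def fieldL (n : String) : Option String :=
  if PySem.Str.isIn "eng" n then some "eng"
  else if PySem.Str.isIn "jpn" n then some "jpn"
  else if PySem.Str.isIn "rus" n then some "rus"
  else if PySem.Str.isIn "tat" n then some "tat"
  else if PySem.Str.isIn "ukr" n then some "ukr"
  else if PySem.Str.isIn "zho" n then some "zho"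
  else none

-- flattened forms matching B's one-rule-per-line chains
def fieldE' (n : String) : Option String :=
  if PySem.Str.isIn "exp1" n then some "Exp1"
  else if PySem.Str.isIn "direct_finetune" n then some "Exp1"
  else if PySem.Str.isIn "exp2" n then some "Exp2"
  else if PySem.Str.isIn "pretrained_only" n then some "Exp2"
  else if PySem.Str.isIn "exp3" n then some "Exp3"
  else if PySem.Str.isIn "pretrain_finetune" n then some "Exp3"
  else none

def fieldD' (n : String) : Option String :=
  if PySem.Str.isIn "language_specific" n then some "language_specific"
  else if PySem.Str.isIn "multilingual_shuffled" n then some "multilingual_shuffled"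
  else if PySem.Str.isIn "shuffled" n then some "multilingual_shuffled"
  else none

lemma fieldE_eq (n : String) : fieldE n = fieldE' n := by
  unfold fieldE fieldE'; cases h1 : PySem.Str.isIn "exp1" n <;>
    cases h2 : PySem.Str.isIn "direct_finetune" n <;>
    cases h3 : PySem.Str.isIn "exp2" n <;>
    cases h4 : PySem.Str.isIn "pretrained_only" n <;>
    cases h5 : PySem.Str.isIn "exp3" n <;>
    cases h6 : PySem.Str.isIn "pretrain_finetune" n <;> simp

lemma fieldD_eq (n : String) : fieldD n = fieldD' n := by
  unfold fieldD fieldD'; cases h1 : PySem.Str.isIn "language_specific" n <;>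
    cases h2 : PySem.Str.isIn "multilingual_shuffled" n <;>
    cases h3 : PySem.Str.isIn "shuffled" n <;> simp

lemma a_components (n : String) :
    extract_experiment_info n =
      [("exp_type", fieldE n), ("model", fieldM n), ("data_structure", fieldD n),
       ("language", fieldL n)] := by
  simp only [extract_experiment_info]
  have hE : (if PySem.Str.isIn "exp1" n || PySem.Str.isIn "direct_finetune" n then
        PySem.Dict.insert (PySem.Dict.ofList [("exp_type", none), ("model", none), ("data_structure", none), ("language", none)]) "exp_type" (some "Exp1")
      else if PySem.Str.isIn "exp2" n || PySem.Str.isIn "pretrained_only" n then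
        PySem.Dict.insert (PySem.Dict.ofList [("exp_type", none), ("model", none), ("data_structure", none), ("language", none)]) "exp_type" (some "Exp2")
      else if PySem.Str.isIn "exp3" n || PySem.Str.isIn "pretrain_finetune" n then
        PySem.Dict.insert (PySem.Dict.ofList [("exp_type", none), ("model", none), ("data_structure", none), ("language", none)]) "exp_type" (some "Exp3")
      else PySem.Dict.ofList [("exp_type", none), ("model", none), ("data_structure", none), ("language", none)]) =
      PySem.Dict.ofList [("exp_type", fieldE n), ("model", none), ("data_structure", none), ("language", none)] := by
    unfold fieldE; split_ifs <;> rfl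
  rw [hE]
  have hM : (if PySem.Str.isIn "base" n then
        PySem.Dict.insert (PySem.Dict.ofList [("exp_type", fieldE n), ("model", none), ("data_structure", none), ("language", none)]) "model" (some "base")
      else if PySem.Str.isIn "large" n then
        PySem.Dict.insert (PySem.Dict.ofList [("exp_type", fieldE n), ("model", none), ("data_structure", none), ("language", none)]) "model" (some "large")
      else if PySem.Str.isIn "xl" n then
        PySem.Dict.insert (PySem.Dict.ofList [("exp_type", fieldE n), ("model", none), ("data_structure", none), ("language", none)]) "model" (some "xl")
      else if PySem.Str.isIn "mbert" n then
        PySem.Dict.insert (PySem.Dict.ofList [("exp_type", fieldE n), ("model", none), ("data_structure", none), ("language", none)]) "model" (some "mbert")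
      else if PySem.Str.isIn "mdeberta" n then
        PySem.Dict.insert (PySem.Dict.ofList [("exp_type", fieldE n), ("model", none), ("data_structure", none), ("language", none)]) "model" (some "mdeberta")
      else PySem.Dict.ofList [("exp_type", fieldE n), ("model", none), ("data_structure", none), ("language", none)]) =
      PySem.Dict.ofList [("exp_type", fieldE n), ("model", fieldM n), ("data_structure", none), ("language", none)] := by
    unfold fieldM; split_ifs <;> rfl
  rw [hM]
  have hD : (if PySem.Str.isIn "language_specific" n then
        PySem.Dict.insert (PySem.Dict.ofList [("exp_type", fieldE n), ("model", fieldM n), ("data_structure", none), ("language", none)]) "data_structure" (some "language_specific")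
      else if PySem.Str.isIn "multilingual_shuffled" n || PySem.Str.isIn "shuffled" n then
        PySem.Dict.insert (PySem.Dict.ofList [("exp_type", fieldE n), ("model", fieldM n), ("data_structure", none), ("language", none)]) "data_structure" (some "multilingual_shuffled")
      else PySem.Dict.ofList [("exp_type", fieldE n), ("model", fieldM n), ("data_structure", none), ("language", none)]) =
      PySem.Dict.ofList [("exp_type", fieldE n), ("model", fieldM n), ("data_structure", fieldD n), ("language", none)] := by
    unfold fieldD; split_ifs <;> rfl
  rw [hD]
  have hL : aLangLoop n (PySem.Dict.ofList [("exp_type", fieldE n), ("model", fieldM n), ("data_structure", fieldD n), ("language", none)]) ["eng", "jpn", "rus", "tat", "ukr", "zho"] =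
      PySem.Dict.ofList [("exp_type", fieldE n), ("model", fieldM n), ("data_structure", fieldD n), ("language", fieldL n)] := by
    unfold fieldL; simp only [aLangLoop]; split_ifs <;> rfl
  rw [hL]
  rfl

-- membership in the hit set after the inner pattern loop at one position
lemma mem_scanPats (chars : List Char) (i : Nat) :
    ∀ (pats : List String) (hits : PySem.Set String) (p : String),
      p ∈ pvScanPats chars i hits pats ↔
        p ∈ hits ∨ (p ∈ pats ∧ PySem.Chars.startswith (chars.drop i) p.toList = true) := by
  intro pats
  induction pats with
  | nil => intro hits p; simp [pvScanPats]
  | cons q rest ih =>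
      intro hits p
      simp only [pvScanPats]
      by_cases hq : (!(PySem.Set.contains hits q) &&
          PySem.Chars.startswith (chars.drop i) q.toList) = true
      · rw [if_pos hq, ih]
        obtain ⟨-, hsw⟩ := Bool.and_eq_true_iff.mp hq
        simp only [PySem.Set.mem_add, List.mem_cons]
        constructor
        · rintro ((h | rfl) | ⟨hr, hs⟩)
          · exact Or.inl h
          · exact Or.inr ⟨Or.inl rfl, hsw⟩
          · exact Or.inr ⟨Or.inr hr, hs⟩
        · rintro (h | ⟨(rfl | hr), hs⟩)
          · exact Or.inl (Or.inl h)
          · exact Or.inl (Or.inr rfl)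
          · exact Or.inr ⟨hr, hs⟩
      · rw [if_neg hq, ih]
        simp only [Bool.and_eq_true, Bool.not_eq_true', not_and] at hq
        simp only [List.mem_cons]
        constructor
        · rintro (h | ⟨hr, hs⟩)
          · exact Or.inl h
          · exact Or.inr ⟨Or.inr hr, hs⟩
        · rintro (h | ⟨(rfl | hr), hs⟩)
          · exact Or.inl h
          · cases h : PySem.Set.contains hits p with
            | false => exact absurd hs (hq h)
            | true => exact Or.inl ((PySem.Set.contains_iff _ _).mp h)
          · exact Or.inr ⟨hr, hs⟩

-- membership in the hit set after the whole scan
lemma mem_scanFold (chars : List Char) :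
    ∀ (idxs : List Nat) (init : PySem.Set String) (p : String),
      p ∈ idxs.foldl (fun h i => pvScanPats chars i h pvPatterns) init ↔
        p ∈ init ∨ ∃ i ∈ idxs, p ∈ pvPatterns ∧
          PySem.Chars.startswith (chars.drop i) p.toList = true := by
  intro idxs
  induction idxs with
  | nil => intro init p; simp
  | cons j rest ih =>
      intro init p
      simp only [List.foldl_cons, ih, mem_scanPats, List.mem_cons]
      constructor
      · rintro ((h | ⟨hp, hs⟩) | ⟨i, hi, hp, hs⟩)
        · exact Or.inl h
        · exact Or.inr ⟨j, Or.inl rfl, hp, hs⟩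
        · exact Or.inr ⟨i, Or.inr hi, hp, hs⟩
      · rintro (h | ⟨i, (rfl | hi), hp, hs⟩)
        · exact Or.inl (Or.inl h)
        · exact Or.inl (Or.inr ⟨hp, hs⟩)
        · exact Or.inr ⟨i, hi, hp, hs⟩

-- the hit set records exactly the nonempty patterns occurring as substrings
lemma contains_hits (n : String) (p : String) (hp : p ∈ pvPatterns) (hne : p.toList ≠ []) :
    PySem.Set.contains
      ((List.range n.toList.length).foldl
        (fun h i => pvScanPats n.toList i h pvPatterns) PySem.Set.empty) p =
      PySem.Str.isIn p n := by
  rw [Bool.eq_iff_iff, PySem.Set.contains_iff, mem_scanFold, PySem.Str.isIn_iff_infix]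
  rw [← PySem.Chars.isIn_iff_infix, ← PySem.Chars.exists_prefix_drop_iff_isIn]
  constructor
  · rintro (h | ⟨i, -, -, hs⟩)
    · exact absurd h (by simp [PySem.Set.empty])
    · exact ⟨i, (PySem.Chars.startswith_iff _ _).mp hs⟩
  · rintro ⟨j, hj⟩
    right
    by_cases hlt : j < n.toList.length
    · exact ⟨j, List.mem_range.mpr hlt, hp, (PySem.Chars.startswith_iff _ _).mpr hj⟩
    · exfalso
      rw [List.drop_eq_nil_of_le (Nat.le_of_not_lt hlt)] at hj
      exact hne (List.prefix_nil.mp hj)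

lemma b_components (n : String) :
    extract_experiment_info_alt n =
      [("exp_type", fieldE' n), ("model", fieldM n), ("data_structure", fieldD' n),
       ("language", fieldL n)] := by
  unfold extract_experiment_info_alt
  have hc : ∀ p ∈ pvPatterns, p.toList ≠ [] →
      PySem.Set.contains
        ((List.range n.toList.length).foldl
          (fun h i => pvScanPats n.toList i h pvPatterns) PySem.Set.empty) p =
        PySem.Str.isIn p n := fun p hp hne => contains_hits n p hp hne
  have c01 := hc "exp1" (by simp [pvPatterns]) (by decide)
  have c02 := hc "direct_finetune" (by simp [pvPatterns]) (by decide)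
  have c03 := hc "exp2" (by simp [pvPatterns]) (by decide)
  have c04 := hc "pretrained_only" (by simp [pvPatterns]) (by decide)
  have c05 := hc "exp3" (by simp [pvPatterns]) (by decide)
  have c06 := hc "pretrain_finetune" (by simp [pvPatterns]) (by decide)
  have c07 := hc "base" (by simp [pvPatterns]) (by decide)
  have c08 := hc "large" (by simp [pvPatterns]) (by decide)
  have c09 := hc "xl" (by simp [pvPatterns]) (by decide)
  have c10 := hc "mbert" (by simp [pvPatterns]) (by decide)
  have c11 := hc "mdeberta" (by simp [pvPatterns]) (by decide)
  have c12 := hc "language_specific" (by simp [pvPatterns]) (by decide)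
  have c13 := hc "multilingual_shuffled" (by simp [pvPatterns]) (by decide)
  have c14 := hc "shuffled" (by simp [pvPatterns]) (by decide)
  have c15 := hc "eng" (by simp [pvPatterns]) (by decide)
  have c16 := hc "jpn" (by simp [pvPatterns]) (by decide)
  have c17 := hc "rus" (by simp [pvPatterns]) (by decide)
  have c18 := hc "tat" (by simp [pvPatterns]) (by decide)
  have c19 := hc "ukr" (by simp [pvPatterns]) (by decide)
  have c20 := hc "zho" (by simp [pvPatterns]) (by decide)
  set hits := (List.range n.toList.length).foldl
    (fun h i => pvScanPats n.toList i h pvPatterns) PySem.Set.empty with hhits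
  simp only [pvFields, pvFieldLoop]
  have hE : pvRuleLoop hits (PySem.Dict.insert PySem.Dict.empty "exp_type" none) "exp_type"
      [("exp1", "Exp1"), ("direct_finetune", "Exp1"), ("exp2", "Exp2"),
       ("pretrained_only", "Exp2"), ("exp3", "Exp3"), ("pretrain_finetune", "Exp3")] =
      PySem.Dict.ofList [("exp_type", fieldE' n)] := by
    simp only [pvRuleLoop, c01, c02, c03, c04, c05, c06]
    unfold fieldE'; split_ifs <;> rfl
  rw [hE]
  have hM : pvRuleLoop hits
      (PySem.Dict.insert (PySem.Dict.ofList [("exp_type", fieldE' n)]) "model" none) "model"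
      [("base", "base"), ("large", "large"), ("xl", "xl"), ("mbert", "mbert"),
       ("mdeberta", "mdeberta")] =
      PySem.Dict.ofList [("exp_type", fieldE' n), ("model", fieldM n)] := by
    simp only [pvRuleLoop, c07, c08, c09, c10, c11]
    unfold fieldM; split_ifs <;> rfl
  rw [hM]
  have hD : pvRuleLoop hits
      (PySem.Dict.insert (PySem.Dict.ofList [("exp_type", fieldE' n), ("model", fieldM n)])
        "data_structure" none) "data_structure"
      [("language_specific", "language_specific"),
       ("multilingual_shuffled", "multilingual_shuffled"), ("shuffled", "multilingual_shuffled")] =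
      PySem.Dict.ofList [("exp_type", fieldE' n), ("model", fieldM n),
        ("data_structure", fieldD' n)] := by
    simp only [pvRuleLoop, c12, c13, c14]
    unfold fieldD'; split_ifs <;> rfl
  rw [hD]
  have hL : pvRuleLoop hits
      (PySem.Dict.insert (PySem.Dict.ofList [("exp_type", fieldE' n), ("model", fieldM n),
        ("data_structure", fieldD' n)]) "language" none) "language"
      [("eng", "eng"), ("jpn", "jpn"), ("rus", "rus"), ("tat", "tat"), ("ukr", "ukr"),
       ("zho", "zho")] =
      PySem.Dict.ofList [("exp_type", fieldE' n), ("model", fieldM n),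
        ("data_structure", fieldD' n), ("language", fieldL n)] := by
    simp only [pvRuleLoop, c15, c16, c17, c18, c19, c20]
    unfold fieldL; split_ifs <;> rfl
  rw [hL]
  rfl

theorem extract_experiment_info_spec : Claim_equal_extract_experiment_info := by
  intro n _
  unfold Spec_extract_experiment_info
  rw [a_components, b_components, fieldE_eq, fieldD_eq]
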